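-- pv_equiv track=rewrite | github.com/Iota-School/notebooks-for-all | tests/test_w3c.py | organize_validator_results
-- ===== SOURCE A (Python) =====
-- import collections
-- import functools
-- import itertools
-- import operator
--
-- def organize_validator_results(results):
--     collect = collections.defaultdict(functools.partial(collections.defaultdict, list))
--     for (error, msg), group in itertools.groupby(
--         results["messages"], key=operator.itemgetter("type", "message")
--     ):
--         for item in group:
--             collect[error][msg].append(item)
--     return collect
-- ===== SOURCE B (Python) =====
-- def _group(items, key):
--     return {k: [m for m in items if key(m) == k]
--             for k in dict.fromkeys(key(m) for m in items)}
--
-- def organize_validator_results(results):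
--     return {t: _group(grp, lambda m: m["message"])
--             for t, grp in _group(results["messages"], lambda m: m["type"]).items()}
-- ===== Notes on version B (the rewrite author's own statement) =====
-- stated objective: alternative
-- what changed: Replaced the mutating groupby-into-nested-defaultdict loop by a declarative two-stage grouping: a helper that lists the distinct keys (dict.fromkeys) and rebuilds each group by filtering, applied first by 'type' and then by 'message'; B returns plain dicts that compare equal to A's defaultdicts.
import Mathlib
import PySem

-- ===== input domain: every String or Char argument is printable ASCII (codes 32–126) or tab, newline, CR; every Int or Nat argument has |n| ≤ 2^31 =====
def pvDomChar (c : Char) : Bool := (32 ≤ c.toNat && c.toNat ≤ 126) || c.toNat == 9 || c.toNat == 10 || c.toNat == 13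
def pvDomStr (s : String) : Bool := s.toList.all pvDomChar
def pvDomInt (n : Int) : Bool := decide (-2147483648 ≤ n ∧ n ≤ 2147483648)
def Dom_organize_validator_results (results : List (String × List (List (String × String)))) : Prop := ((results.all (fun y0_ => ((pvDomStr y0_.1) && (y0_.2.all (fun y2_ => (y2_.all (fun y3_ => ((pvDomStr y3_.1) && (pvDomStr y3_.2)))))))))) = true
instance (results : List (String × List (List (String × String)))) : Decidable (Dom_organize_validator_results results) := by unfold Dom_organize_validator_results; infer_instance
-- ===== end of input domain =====

-- B replaces the mutating groupby-into-nested-defaultdict loop by a declarative two-stage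
-- grouping (distinct keys via dict.fromkeys, each group rebuilt by filtering), applied by
-- 'type' and then by 'message'; equal as a mapping (B returns plain dicts, not defaultdicts).

-- item["type"] / item["message"] (under Pre_ both keys are present; the "" default is never
-- used inside Pre_, where Python would raise KeyError instead)
def pvType (item : List (String × String)) : String :=
  ((PySem.Dict.ofList item).get? "type").getD ""
def pvMsg (item : List (String × String)) : String :=
  ((PySem.Dict.ofList item).get? "message").getD ""

-- ===== PORT A =====
-- operator.itemgetter("type", "message") on an item dict
def pvKey (item : List (String × String)) : String × String := (pvType item, pvMsg item)

-- collect[error][msg].append(item) on the nested defaultdict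
def pvStep (c : PySem.Dict String (PySem.Dict String (List (List (String × String)))))
    (e m : String) (item : List (String × String)) :
    PySem.Dict String (PySem.Dict String (List (List (String × String)))) :=
  let inner := c.getD e PySem.Dict.empty
  c.insert e (inner.insert m (inner.getD m [] ++ [item]))

-- itertools.groupby(xs, key=pvKey): maximal runs of consecutive equal keys
def pvGroupby : List (List (String × String)) → List ((String × String) × List (List (String × String)))
  | [] => []
  | x :: rest =>
    match pvGroupby rest with
    | [] => [(pvKey x, [x])]
    | (k, g) :: t => if pvKey x = k then (k, x :: g) :: t else (pvKey x, [x]) :: (k, g) :: t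

def organize_validator_results (results : List (String × List (List (String × String)))) : List (String × List (String × List (List (String × String)))) :=
  let msgs := ((PySem.Dict.ofList results).get? "messages").getD []
  let collect := (pvGroupby msgs).foldl
    (fun c kg => kg.2.foldl (fun c item => pvStep c kg.1.1 kg.1.2 item) c)
    PySem.Dict.empty
  collect.items.map (fun p => (p.1, p.2.items))

-- ===== PORT B =====
-- _group(items, key): the distinct keys in first-occurrence order (dict.fromkeys =
-- PySem.List.dedup), each mapped to the sublist of items carrying it
def pvGroup {α : Type} (items : List α) (key : α → String) : List (String × List α) :=
  (PySem.List.dedup (items.map key)).map (fun k => (k, items.filter (fun m => key m == k)))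

def organize_validator_results_alt (results : List (String × List (List (String × String)))) : List (String × List (String × List (List (String × String)))) :=
  let msgs := ((PySem.Dict.ofList results).get? "messages").getD []
  (pvGroup msgs pvType).map (fun p => (p.1, pvGroup p.2 pvMsg))

-- ===== PRECONDITION & SPEC =====
-- Pre_ excludes exactly the inputs where Python A raises KeyError: a missing "messages" key,
-- or a message item lacking a "type" or "message" key.
def Pre_organize_validator_results (results : List (String × List (List (String × String)))) : Prop :=
  match (PySem.Dict.ofList results).get? "messages" with
  | none => False
  | some ms => ∀ item ∈ ms,
      (PySem.Dict.ofList item).contains "type" = true ∧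
      (PySem.Dict.ofList item).contains "message" = true

instance (results : List (String × List (List (String × String)))) : Decidable (Pre_organize_validator_results results) := by
  unfold Pre_organize_validator_results
  rcases (PySem.Dict.ofList results).get? "messages" with _ | ms <;> infer_instance

def pvWitness_organize_validator_results : (List (String × List (List (String × String)))) :=
  [("messages", [[("type", "error"), ("message", "bad"), ("extract", "x")],
                 [("type", "error"), ("message", "bad")],
                 [("type", "info"), ("message", "ok")]])]

def Spec_organize_validator_results (results : List (String × List (List (String × String)))) (out : List (String × List (String × List (List (String × String))))) : Prop := out = organize_validator_results_alt results
-- instance search gives up at this nesting depth; assemble the DecidableEq by hand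
def pvDecEqOut : DecidableEq (List (String × List (String × List (List (String × String))))) :=
  @instDecidableEqList _ (@instDecidableEqProd _ _ _ (@instDecidableEqList _ (by infer_instance)))
instance (results : List (String × List (List (String × String)))) (out : List (String × List (String × List (List (String × String))))) : Decidable (Spec_organize_validator_results results out) := by unfold Spec_organize_validator_results; exact pvDecEqOut _ _

-- ===== CLAIM (what is proved, stated in full; the proofs are below) =====
def Claim_equal_organize_validator_results : Prop := ∀ (results : List (String × List (List (String × String)))), Dom_organize_validator_results results → Pre_organize_validator_results results → Spec_organize_validator_results results (organize_validator_results results)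

-- ===== LEMMAS AND PROOFS =====

-- every item of a group carries the group's key
theorem pvGroupby_key : ∀ (xs : List (List (String × String))) (kg : (String × String) × List (List (String × String))),
    kg ∈ pvGroupby xs → ∀ i ∈ kg.2, pvKey i = kg.1 := by
  intro xs
  induction xs with
  | nil => intro kg h; simp [pvGroupby] at h
  | cons x rest ih =>
    intro kg h i hi
    simp only [pvGroupby] at h
    rcases hgb : pvGroupby rest with _ | ⟨⟨k, g⟩, t⟩
    · rw [hgb] at h
      simp at h
      subst h
      simp at hi
      subst hi; rfl
    · rw [hgb] at h
      by_cases hk : pvKey x = k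
      · simp [hk] at h
        rcases h with h | h
        · subst h
          simp at hi
          rcases hi with hi | hi
          · subst hi; exact hk
          · exact ih (k, g) (by rw [hgb]; simp) i hi
        · exact ih kg (by rw [hgb]; simp [h]) i hi
      · simp [hk] at h
        rcases h with h | h
        · subst h; simp at hi; subst hi; rfl
        · exact ih kg (by rw [hgb]; simp [h]) i hi

-- the groups flatten back to the original list
theorem pvGroupby_flatten : ∀ (xs : List (List (String × String))),
    ((pvGroupby xs).map Prod.snd).flatten = xs := by
  intro xs
  induction xs with
  | nil => simp [pvGroupby]
  | cons x rest ih =>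
    simp only [pvGroupby]
    rcases hgb : pvGroupby rest with _ | ⟨⟨k, g⟩, t⟩
    · rw [hgb] at ih; simp at ih; simp [← ih]
    · rw [hgb] at ih
      by_cases hk : pvKey x = k
      · simp [hk]
        simp at ih
        simp [← ih]
      · simp [hk]
        simp at ih
        simp [← ih]

-- an inner group loop with the group key equals the per-item-key loop
theorem foldl_group_key (g : List (List (String × String))) (k : String × String)
    (hg : ∀ i ∈ g, pvKey i = k) (c : PySem.Dict String (PySem.Dict String (List (List (String × String))))) :
    g.foldl (fun c item => pvStep c k.1 k.2 item) c
      = g.foldl (fun c item => pvStep c (pvKey item).1 (pvKey item).2 item) c := by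
  induction g generalizing c with
  | nil => rfl
  | cons i g ih =>
    simp only [List.foldl_cons]
    rw [hg i (by simp)]
    exact ih (fun j hj => hg j (by simp [hj])) _

-- A's nested fold over the groups equals the flat fold over the flattened items
theorem foldl_groups (gs : List ((String × String) × List (List (String × String))))
    (hgs : ∀ kg ∈ gs, ∀ i ∈ kg.2, pvKey i = kg.1)
    (c : PySem.Dict String (PySem.Dict String (List (List (String × String))))) :
    gs.foldl (fun c kg => kg.2.foldl (fun c item => pvStep c kg.1.1 kg.1.2 item) c) c
      = ((gs.map Prod.snd).flatten).foldl (fun c item => pvStep c (pvKey item).1 (pvKey item).2 item) c := by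
  induction gs generalizing c with
  | nil => rfl
  | cons kg gs ih =>
    simp only [List.foldl_cons, List.map_cons, List.flatten_cons, List.foldl_append]
    rw [foldl_group_key kg.2 kg.1 (hgs kg (by simp)) c]
    exact ih (fun kg' h' => hgs kg' (by simp [h'])) _

-- the flat fold, looked up at an outer key t, is the inner append-grouping fold over
-- the items of type t
theorem getD_flat_fold (msgs : List (List (String × String)))
    (c : PySem.Dict String (PySem.Dict String (List (List (String × String))))) (t : String) :
    (msgs.foldl (fun c item => pvStep c (pvKey item).1 (pvKey item).2 item) c).getD t PySem.Dict.empty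
      = (msgs.filter (fun i => pvType i == t)).foldl
          (fun d i => d.modify (pvMsg i) [] (· ++ [i])) (c.getD t PySem.Dict.empty) := by
  induction msgs generalizing c with
  | nil => rfl
  | cons x xs ih =>
    simp only [List.foldl_cons, List.filter_cons]
    rw [ih]
    by_cases hx : pvType x = t
    · simp only [hx, beq_self_eq_true, if_pos, List.foldl_cons]
      congr 1
      show (pvStep c (pvType x) (pvMsg x) x).getD t PySem.Dict.empty = _
      unfold pvStep
      rw [PySem.Dict.getD_insert]
      simp [hx, PySem.Dict.modify]
    · have : (pvType x == t) = false := by simp [hx]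
      simp only [this, if_neg, Bool.false_eq_true, not_false_iff]
      congr 1
      show (pvStep c (pvType x) (pvMsg x) x).getD t PySem.Dict.empty = _
      unfold pvStep
      rw [PySem.Dict.getD_insert]
      simp [Ne.symm hx]

-- the inner append-grouping fold from empty produces exactly pvGroup of its items by pvMsg
theorem inner_fold_items (l : List (List (String × String))) :
    (l.foldl (fun d i => d.modify (pvMsg i) [] (· ++ [i]))
        (PySem.Dict.empty : PySem.Dict String (List (List (String × String))))).items
      = pvGroup l pvMsg := by
  have hnd : (l.foldl (fun d i => d.modify (pvMsg i) [] (· ++ [i]))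
      (PySem.Dict.empty : PySem.Dict String (List (List (String × String))))).keys.Nodup :=
    PySem.Dict.nodup_keys_foldl_modify_key l pvMsg [] (fun d i acc => acc ++ [i]) _ (by simp)
  have hkeys : (l.foldl (fun d i => d.modify (pvMsg i) [] (· ++ [i]))
      (PySem.Dict.empty : PySem.Dict String (List (List (String × String))))).keys
      = PySem.Set.ofList (l.map pvMsg) := by
    rw [PySem.Dict.keys_foldl_modify_key]
    simp [PySem.Set.update, PySem.Set.ofList_eq_foldl]
  rw [PySem.Dict.items_eq_map_keys _ hnd [], hkeys]
  unfold pvGroup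
  rw [PySem.List.dedup_eq_ofList]
  apply List.map_congr_left
  intro m _
  congr 1
  have : l.foldl (fun d i => d.modify (pvMsg i) [] (· ++ [i]))
      (PySem.Dict.empty : PySem.Dict String (List (List (String × String))))
      = (l.map (fun i => (pvMsg i, i))).foldl (fun d p => d.modify p.1 [] (· ++ [p.2]))
        PySem.Dict.empty := by
    rw [List.foldl_map]
  rw [this, PySem.Dict.getD_foldl_modify_append]
  simp [List.filter_map, Function.comp_def]

-- the full flat fold's rendered items are B's nested grouping
theorem flat_fold_eq_group (msgs : List (List (String × String))) :
    ((msgs.foldl (fun c item => pvStep c (pvKey item).1 (pvKey item).2 item)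
        (PySem.Dict.empty : PySem.Dict String (PySem.Dict String (List (List (String × String)))))).items.map
      (fun p => (p.1, p.2.items)))
      = (pvGroup msgs pvType).map (fun p => (p.1, pvGroup p.2 pvMsg)) := by
  set f := msgs.foldl (fun c item => pvStep c (pvKey item).1 (pvKey item).2 item)
      (PySem.Dict.empty : PySem.Dict String (PySem.Dict String (List (List (String × String))))) with hf
  have hstep : (fun c item => pvStep c (pvKey item).1 (pvKey item).2 item)
      = fun (c : PySem.Dict String (PySem.Dict String (List (List (String × String))))) item =>
          c.insert (pvType item)
            ((c.getD (pvType item) PySem.Dict.empty).insert (pvMsg item)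
              ((c.getD (pvType item) PySem.Dict.empty).getD (pvMsg item) [] ++ [item])) := rfl
  have hnd : f.keys.Nodup := by
    rw [hf, hstep]
    exact PySem.Dict.nodup_keys_foldl_insert_key msgs pvType _ _ (by simp)
  have hkeys : f.keys = PySem.Set.ofList (msgs.map pvType) := by
    rw [hf, hstep, PySem.Dict.keys_foldl_insert_key]
    simp [PySem.Set.update, PySem.Set.ofList_eq_foldl]
  rw [PySem.Dict.items_eq_map_keys f hnd PySem.Dict.empty, hkeys, List.map_map]
  unfold pvGroup
  rw [PySem.List.dedup_eq_ofList]
  simp only [List.map_map]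
  apply List.map_congr_left
  intro t _
  simp only [Function.comp_def]
  congr 1
  rw [hf, getD_flat_fold]
  simp only [PySem.Dict.getD_empty]
  exact inner_fold_items _

-- ===== VERDICT (by name: the statement is the Claim_ definition above) =====
theorem organize_validator_results_spec : Claim_equal_organize_validator_results := by
  intro results _ _
  unfold Spec_organize_validator_results organize_validator_results organize_validator_results_alt
  simp only
  rw [foldl_groups _ (pvGroupby_key _), pvGroupby_flatten]
  exact flat_fold_eq_group _
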